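-- pv_equiv track=rewrite | github.com/danielhermawan/reddit-daily-programmer-challenge | python/permutation_number.py | solution
-- ===== SOURCE A (Python) =====
-- def solution(nums):
--     rotate = 0
--     map = {}
--     for i in nums:
--         if i not in map.keys():
--             map[i] = 1
--         else:
--             map[i] += 1
--     max = 0
--     target = 0
--     for keys, value in map.items():
--         if value > max:
--             target = keys
--             max = value
--     for i in nums:
--         if i != target:
--             if i + target == 7:
--                 rotate += 2
--             else:
--                 rotate += 1
--     return rotate
-- ===== SOURCE B (Python) =====
-- def solution(nums):
--     # One counting pass + argmax over the counts; the final per-element pass of A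
--     # is replaced by closed-form arithmetic on the counts.
--     counts = {}
--     for i in nums:
--         counts[i] = counts.get(i, 0) + 1
--     target, best = 0, 0
--     for k, v in counts.items():
--         if v > best:
--             target, best = k, v
--     return len(nums) - best + counts.get(7 - target, 0)
-- ===== Notes on version B (the rewrite author's own statement) =====
-- stated objective: simpler
-- what changed: B drops A's third pass over nums: after counting and picking the most-frequent value (same first-wins tie rule), the result is computed in closed form as len(nums) - count[target] + count.get(7 - target, 0).
import Mathlib
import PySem

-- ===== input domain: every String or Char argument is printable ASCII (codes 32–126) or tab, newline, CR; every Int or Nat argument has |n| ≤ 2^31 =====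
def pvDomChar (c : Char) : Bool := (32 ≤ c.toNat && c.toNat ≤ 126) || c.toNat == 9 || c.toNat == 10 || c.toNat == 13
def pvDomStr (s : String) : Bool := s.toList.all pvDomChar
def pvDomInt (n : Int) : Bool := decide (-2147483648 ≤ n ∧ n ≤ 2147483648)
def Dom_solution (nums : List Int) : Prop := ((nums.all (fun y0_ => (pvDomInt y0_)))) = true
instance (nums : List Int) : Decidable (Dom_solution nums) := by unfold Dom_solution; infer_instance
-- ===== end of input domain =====

-- B replaces A's third pass over nums by closed-form arithmetic on the counts (objective: simpler).

-- ===== PORT A =====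
def solution (nums : List Int) : Int :=
  -- map-building loop: if i not in map.keys(): map[i] = 1 else: map[i] += 1
  let m : PySem.Dict Int Int :=
    nums.foldl (fun d i => if d.contains i = false then d.insert i 1 else d.modify i 0 (· + 1))
      PySem.Dict.empty
  -- max/target loop over map.items(); state = (max, target)
  let mt : Int × Int :=
    m.items.foldl (fun p kv => if kv.2 > p.1 then (kv.2, kv.1) else p) (0, 0)
  -- rotate loop over nums
  nums.foldl (fun rotate i =>
      if i ≠ mt.2 then (if i + mt.2 = 7 then rotate + 2 else rotate + 1) else rotate) 0

-- ===== PORT B =====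
def solution_alt (nums : List Int) : Int :=
  let counts : PySem.Dict Int Int :=
    nums.foldl (fun d i => d.insert i (d.getD i 0 + 1)) PySem.Dict.empty
  -- state = (target, best)
  let tb : Int × Int :=
    counts.items.foldl (fun p kv => if kv.2 > p.2 then kv else p) (0, 0)
  (nums.length : Int) - tb.2 + counts.getD (7 - tb.1) 0

-- ===== PRECONDITION & SPEC =====
def Spec_solution (nums : List Int) (out : Int) : Prop := out = solution_alt nums
instance (nums : List Int) (out : Int) : Decidable (Spec_solution nums out) := by unfold Spec_solution; infer_instance

-- ===== CLAIM (what is proved, stated in full; the proofs are below) =====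
def Claim_equal_solution : Prop := ∀ (nums : List Int), Dom_solution nums → Spec_solution nums (solution nums)

-- ===== LEMMAS AND PROOFS =====

-- A's dict-building step is exactly Counter's step.
lemma stepA_eq_counter_step (d : PySem.Dict Int Int) (i : Int) :
    (if d.contains i = false then d.insert i 1 else d.modify i 0 (· + 1)) = d.modify i 0 (· + 1) := by
  by_cases h : d.contains i = false
  · have hg := PySem.Dict.getD_of_not_contains (d := d) (k := i) (d0 := (0:Int)) h
    simp only [PySem.Dict.contains] at h
    simp [h, PySem.Dict.insert, PySem.Dict.modify, PySem.Dict.contains, hg]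
  · simp [h]

lemma dictA_eq_counter (nums : List Int) :
    nums.foldl (fun d i => if d.contains i = false then d.insert i 1 else d.modify i 0 (· + 1))
      PySem.Dict.empty = PySem.Dict.counter nums := by
  rw [PySem.Dict.counter_eq_foldl]
  have : (fun (d : PySem.Dict Int Int) (i : Int) =>
      if d.contains i = false then d.insert i 1 else d.modify i 0 (· + 1))
      = fun d i => d.modify i 0 (· + 1) :=
    funext fun d => funext fun i => stepA_eq_counter_step d i
  rw [this]

lemma dictB_eq_counter (nums : List Int) :
    nums.foldl (fun d i => d.insert i (d.getD i 0 + 1)) PySem.Dict.empty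
      = PySem.Dict.counter nums :=
  PySem.Dict.foldl_insert_getD_add_one_eq_counter nums

-- A's (max, target) fold is the swap of B's (target, best) fold.
lemma argmax_swap (l : List (Int × Int)) (t b : Int) :
    l.foldl (fun p kv => if kv.2 > p.1 then (kv.2, kv.1) else p) (b, t)
      = ((l.foldl (fun p kv => if kv.2 > p.2 then kv else p) (t, b)).2,
         (l.foldl (fun p kv => if kv.2 > p.2 then kv else p) (t, b)).1) := by
  induction l generalizing t b with
  | nil => rfl
  | cons kv l ih =>
    simp only [List.foldl_cons]
    by_cases h : kv.2 > b <;> simp [h, ih]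

-- The argmax fold result is the initial state or a member of the list.
lemma argmax_mem (l : List (Int × Int)) (p : Int × Int) :
    l.foldl (fun p kv => if kv.2 > p.2 then kv else p) p = p
      ∨ l.foldl (fun p kv => if kv.2 > p.2 then kv else p) p ∈ l := by
  induction l generalizing p with
  | nil => exact Or.inl rfl
  | cons kv l ih =>
    simp only [List.foldl_cons]
    rcases ih (if kv.2 > p.2 then kv else p) with h | h
    · rw [h]; by_cases hc : kv.2 > p.2 <;> simp [hc]
    · exact Or.inr (List.mem_cons_of_mem _ h)

-- Closed form of A's third loop.
lemma rotate_loop (t r : Int) (nums : List Int) :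
    nums.foldl (fun rotate i =>
        if i ≠ t then (if i + t = 7 then rotate + 2 else rotate + 1) else rotate) r
      = r + nums.length - nums.count t + nums.count (7 - t) := by
  induction nums generalizing r with
  | nil => simp
  | cons x xs ih =>
    simp only [List.foldl_cons, List.count_cons, List.length_cons]
    rw [ih]
    by_cases hx : x = t
    · simp [hx]; omega
    · by_cases h7 : x + t = 7
      · have : x = 7 - t := by omega
        simp [this]
        by_cases ht : (7 - t) = t <;> (simp [ht]; omega)
      · have hne : x ≠ 7 - t := by omega
        simp [hx, h7, hne]; omega

-- ===== VERDICT (by name: the statement is the Claim_ definition above) =====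
-- The argmax fold lands in the list when some element beats the initial best.
lemma argmax_mem_of_exists (l : List (Int × Int)) (p : Int × Int)
    (h : ∃ kv ∈ l, p.2 < kv.2) :
    l.foldl (fun p kv => if kv.2 > p.2 then kv else p) p ∈ l := by
  induction l generalizing p with
  | nil => simp at h
  | cons kv l ih =>
    simp only [List.foldl_cons]
    by_cases hc : kv.2 > p.2
    · simp only [hc, if_pos]
      rcases argmax_mem l kv with he | he
      · rw [he]; exact List.mem_cons_self
      · exact List.mem_cons_of_mem _ he
    · simp only [hc, if_false]
      obtain ⟨kv0, hmem, hlt⟩ := h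
      rcases List.mem_cons.mp hmem with rfl | hmem'
      · omega
      · exact List.mem_cons_of_mem _ (ih p ⟨kv0, hmem', by simpa using hlt⟩)

theorem solution_spec : Claim_equal_solution := by
  intro nums _
  show solution nums = solution_alt nums
  cases nums with
  | nil => rfl
  | cons x xs =>
    unfold solution solution_alt
    rw [dictA_eq_counter, dictB_eq_counter]
    show (List.foldl _ _ _ : Int) = _
    rw [argmax_swap, rotate_loop]
    set l := (x :: xs : List Int) with hl
    set tb := (PySem.Dict.counter l).items.foldl
      (fun p kv => if kv.2 > p.2 then kv else p) ((0 : Int), (0 : Int)) with htb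
    have hxmem : ((x : Int), ((l.count x : Int))) ∈ (PySem.Dict.counter l).items := by
      rw [PySem.Dict.items_counter]
      exact List.mem_map_of_mem ((PySem.Set.mem_ofList _ _).mpr (by simp [hl]))
    have hmem : tb ∈ (PySem.Dict.counter l).items := by
      apply argmax_mem_of_exists
      refine ⟨_, hxmem, ?_⟩
      have hcnt : 0 < l.count x := List.count_pos_iff.mpr (by simp [hl])
      show (0:Int) < (l.count x : Int)
      exact_mod_cast hcnt
    have hb : tb.2 = (l.count tb.1 : Int) := by
      rw [PySem.Dict.items_counter] at hmem
      obtain ⟨k, _, hk⟩ := List.mem_map.mp hmem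
      rw [← hk]
    show (0:Int) + l.length - (l.count tb.1 : Int) + (l.count (7 - tb.1) : Int)
      = (l.length : Int) - tb.2 + (PySem.Dict.counter l).getD (7 - tb.1) 0
    rw [PySem.Dict.getD_counter]
    omega
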